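-- pv_equiv track=rewrite | github.com/Aryan-Mahajan-79/Regular-Separability-of-One-Counter-Nets | Linear_path_schema_and_profile.py | compute_effect_and_min_counters
-- ===== SOURCE A (Python) =====
-- def compute_effect_and_min_counters(sequence):
--     total_effect = [0, 0]  # Assuming counters are in 2D
--     min_values = [0, 0]  # Minimal values
--
--     for t in sequence:
--         _, _,  _, _, counter1, counter2 = t
--
--         # Update total effect
--         total_effect[0] += counter1
--         total_effect[1] += counter2
--         # Update minimum counters
--         min_values[0] = min(min_values[0], counter1)
--         min_values[1] = min(min_values[1], counter2)
--
--     return total_effect, min_values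
-- ===== SOURCE B (Python) =====
-- def _reduce(seq):
--     # divide-and-conquer reduction; seq is nonempty
--     if len(seq) == 1:
--         _, _, _, _, c1, c2 = seq[0]
--         return c1, c2, c1, c2
--     mid = len(seq) // 2
--     a1, a2, am1, am2 = _reduce(seq[:mid])
--     b1, b2, bm1, bm2 = _reduce(seq[mid:])
--     return a1 + b1, a2 + b2, min(am1, bm1), min(am2, bm2)
--
-- def compute_effect_and_min_counters(sequence):
--     seq = list(sequence)
--     if not seq:
--         return [0, 0], [0, 0]
--     s1, s2, m1, m2 = _reduce(seq)
--     return [s1, s2], [min(0, m1), min(0, m2)]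
-- ===== Notes on version B (the rewrite author's own statement) =====
-- stated objective: alternative
-- what changed: A makes one linear fused accumulation pass; B reduces the sequence by divide-and-conquer, recursively splitting it in half and merging (sum, sum, min, min) of the halves, clamping the minimums against 0 only once at the top.
import Mathlib
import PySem

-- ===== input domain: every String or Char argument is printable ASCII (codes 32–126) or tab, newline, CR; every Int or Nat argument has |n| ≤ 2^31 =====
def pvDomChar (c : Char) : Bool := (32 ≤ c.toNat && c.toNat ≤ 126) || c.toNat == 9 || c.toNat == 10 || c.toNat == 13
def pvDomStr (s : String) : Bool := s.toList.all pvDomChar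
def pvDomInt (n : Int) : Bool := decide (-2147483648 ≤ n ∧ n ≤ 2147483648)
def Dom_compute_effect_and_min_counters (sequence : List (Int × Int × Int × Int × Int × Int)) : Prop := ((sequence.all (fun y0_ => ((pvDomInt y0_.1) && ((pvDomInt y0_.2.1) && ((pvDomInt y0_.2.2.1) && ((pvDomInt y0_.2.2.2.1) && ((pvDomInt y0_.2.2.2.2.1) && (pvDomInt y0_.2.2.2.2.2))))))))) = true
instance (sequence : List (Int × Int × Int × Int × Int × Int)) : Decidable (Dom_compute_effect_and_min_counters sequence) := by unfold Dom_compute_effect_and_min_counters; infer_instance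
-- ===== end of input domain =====

-- B replaces A's fused linear accumulation pass with a divide-and-conquer reduction (alternative decomposition, no speed claim)

-- ===== PORT A =====
-- A: one fused loop maintaining totals and minimums together
def compute_effect_and_min_counters (sequence : List (Int × Int × Int × Int × Int × Int)) : List Int × List Int :=
  let st := sequence.foldl
    (fun (st : (Int × Int) × (Int × Int)) t =>
      ((st.1.1 + t.2.2.2.2.1, st.1.2 + t.2.2.2.2.2),
       (min st.2.1 t.2.2.2.2.1, min st.2.2 t.2.2.2.2.2)))
    ((0, 0), (0, 0))
  ([st.1.1, st.1.2], [st.2.1, st.2.2])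

-- ===== PORT B =====
-- B's helper _reduce: divide-and-conquer over a nonempty list; the [] branch is only a
-- totalization guard (Python never calls _reduce on an empty list)
def pvReduce (seq : List (Int × Int × Int × Int × Int × Int)) : Int × Int × Int × Int :=
  if _h : seq.length ≤ 1 then
    match seq with
    | [] => (0, 0, 0, 0)
    | t :: _ => (t.2.2.2.2.1, t.2.2.2.2.2, t.2.2.2.2.1, t.2.2.2.2.2)
  else
    let mid := seq.length / 2
    let a := pvReduce (seq.take mid)
    let b := pvReduce (seq.drop mid)
    (a.1 + b.1, a.2.1 + b.2.1, min a.2.2.1 b.2.2.1, min a.2.2.2 b.2.2.2)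
termination_by seq.length
decreasing_by
  · simp [List.length_take]; omega
  · simp [List.length_drop]; omega

def compute_effect_and_min_counters_alt (sequence : List (Int × Int × Int × Int × Int × Int)) : List Int × List Int :=
  match sequence with
  | [] => ([0, 0], [0, 0])
  | _ :: _ =>
    let r := pvReduce sequence
    ([r.1, r.2.1], [min 0 r.2.2.1, min 0 r.2.2.2])

-- ===== PRECONDITION & SPEC =====
def Spec_compute_effect_and_min_counters (sequence : List (Int × Int × Int × Int × Int × Int)) (out : List Int × List Int) : Prop := out = compute_effect_and_min_counters_alt sequence
instance (sequence : List (Int × Int × Int × Int × Int × Int)) (out : List Int × List Int) : Decidable (Spec_compute_effect_and_min_counters sequence out) := by unfold Spec_compute_effect_and_min_counters; infer_instance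

-- ===== CLAIM =====
def Claim_equal_compute_effect_and_min_counters : Prop := ∀ (sequence : List (Int × Int × Int × Int × Int × Int)), Dom_compute_effect_and_min_counters sequence → Spec_compute_effect_and_min_counters sequence (compute_effect_and_min_counters sequence)

-- ===== LEMMAS AND PROOFS =====

-- minimum of a list as "fold min from the first element" (none on [])
def nmin : List Int → Option Int
  | [] => none
  | x :: xs => some (xs.foldl min x)

lemma foldl_min_min (l : List Int) (a b : Int) :
    l.foldl min (min a b) = min a (l.foldl min b) := by
  induction l generalizing b with
  | nil => rfl
  | cons x xs ih =>
    simp only [List.foldl]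
    rw [min_assoc, ih]

lemma foldl_min_eq (l : List Int) (a : Int) :
    l.foldl min a = match nmin l with | none => a | some m => min a m := by
  cases l with
  | nil => rfl
  | cons x xs =>
    simp only [List.foldl, nmin]
    rw [← foldl_min_min]

lemma nmin_append (l₁ l₂ : List Int) (m₁ m₂ : Int)
    (h₁ : nmin l₁ = some m₁) (h₂ : nmin l₂ = some m₂) :
    nmin (l₁ ++ l₂) = some (min m₁ m₂) := by
  cases l₁ with
  | nil => simp [nmin] at h₁
  | cons x xs =>
    cases l₂ with
    | nil => simp [nmin] at h₂
    | cons y ys =>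
      simp only [nmin, Option.some.injEq] at h₁ h₂
      subst h₁; subst h₂
      rw [List.cons_append]
      simp only [nmin, Option.some.injEq]
      rw [List.foldl_append]
      simp only [List.foldl]
      rw [← foldl_min_min]

lemma sum_take_drop (f : (Int × Int × Int × Int × Int × Int) → Int)
    (seq : List (Int × Int × Int × Int × Int × Int)) (mid : Nat) :
    ((seq.take mid).map f).sum + ((seq.drop mid).map f).sum = (seq.map f).sum := by
  rw [← List.sum_append, ← List.map_append, List.take_append_drop]

-- pvReduce computes exactly (column sums, column minimums) on nonempty lists
lemma pvReduce_spec (seq : List (Int × Int × Int × Int × Int × Int)) (h : seq ≠ []) :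
    pvReduce seq =
      ((seq.map (fun t => t.2.2.2.2.1)).sum, (seq.map (fun t => t.2.2.2.2.2)).sum,
       (nmin (seq.map (fun t => t.2.2.2.2.1))).getD 0,
       (nmin (seq.map (fun t => t.2.2.2.2.2))).getD 0) := by
  induction hn : seq.length using Nat.strong_induction_on generalizing seq with
  | _ n ih =>
    rw [pvReduce]
    by_cases hle : seq.length ≤ 1
    · rw [dif_pos hle]
      cases seq with
      | nil => exact absurd rfl h
      | cons t rest =>
        cases rest with
        | nil => simp [nmin]
        | cons u us => simp at hle
    · rw [dif_neg hle]
      simp only [not_le] at hle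
      have hlen : 2 ≤ seq.length := hle
      set mid := seq.length / 2 with hmid
      have hmid1 : 1 ≤ mid := by omega
      have hmidlt : mid < seq.length := by omega
      have hlt : (seq.take mid).length < n := by
        have h1 : (seq.take mid).length = min mid seq.length := List.length_take
        omega
      have hld : (seq.drop mid).length < n := by
        have h1 : (seq.drop mid).length = seq.length - mid := List.length_drop
        omega
      have htake : seq.take mid ≠ [] := by
        apply List.ne_nil_of_length_pos
        have h1 : (seq.take mid).length = min mid seq.length := List.length_take
        omega
      have hdrop : seq.drop mid ≠ [] := by
        apply List.ne_nil_of_length_pos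
        have h1 : (seq.drop mid).length = seq.length - mid := List.length_drop
        omega
      have ha := ih _ hlt (seq.take mid) htake rfl
      have hb := ih _ hld (seq.drop mid) hdrop rfl
      dsimp only
      rw [ha, hb]
      obtain ⟨x, xs, hx⟩ := List.exists_cons_of_ne_nil htake
      obtain ⟨y, ys, hy⟩ := List.exists_cons_of_ne_nil hdrop
      have key : ∀ f : (Int × Int × Int × Int × Int × Int) → Int,
          min ((nmin ((seq.take mid).map f)).getD 0) ((nmin ((seq.drop mid).map f)).getD 0)
            = (nmin (seq.map f)).getD 0 := by
        intro f
        have hm₁ : nmin ((seq.take mid).map f) = some ((xs.map f).foldl min (f x)) := by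
          rw [hx, List.map_cons]; rfl
        have hm₂ : nmin ((seq.drop mid).map f) = some ((ys.map f).foldl min (f y)) := by
          rw [hy, List.map_cons]; rfl
        have := nmin_append _ _ _ _ hm₁ hm₂
        rw [← List.map_append, List.take_append_drop] at this
        rw [hm₁, hm₂, this]
        rfl
      simp only [sum_take_drop, key]

-- A's fused fold equals four separate column folds
lemma fused_foldl (sequence : List (Int × Int × Int × Int × Int × Int)) (a b c d : Int) :
    sequence.foldl
      (fun (st : (Int × Int) × (Int × Int)) t =>
        ((st.1.1 + t.2.2.2.2.1, st.1.2 + t.2.2.2.2.2),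
         (min st.2.1 t.2.2.2.2.1, min st.2.2 t.2.2.2.2.2)))
      ((a, b), (c, d))
    = (((sequence.map (fun t => t.2.2.2.2.1)).foldl (· + ·) a,
        (sequence.map (fun t => t.2.2.2.2.2)).foldl (· + ·) b),
       ((sequence.map (fun t => t.2.2.2.2.1)).foldl min c,
        (sequence.map (fun t => t.2.2.2.2.2)).foldl min d)) := by
  induction sequence generalizing a b c d with
  | nil => rfl
  | cons h tl ih => simp [List.foldl, List.map, ih]

lemma foldl_add_eq_sum (l : List Int) (a : Int) : l.foldl (· + ·) a = a + l.sum := by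
  induction l generalizing a with
  | nil => simp
  | cons x xs ih => simp [List.foldl, ih]; ring

-- ===== VERDICT =====
theorem compute_effect_and_min_counters_spec : Claim_equal_compute_effect_and_min_counters := by
  intro sequence _
  unfold Spec_compute_effect_and_min_counters
  cases hs : sequence with
  | nil => rfl
  | cons t rest =>
    have hne : sequence ≠ [] := by rw [hs]; simp
    rw [← hs]
    unfold compute_effect_and_min_counters compute_effect_and_min_counters_alt
    rw [hs, ← hs]
    simp only [fused_foldl]
    rw [pvReduce_spec sequence hne]
    have h2 : ∀ l : List Int, l.foldl min (0:Int) = min 0 ((nmin l).getD 0) := by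
      intro l
      rw [foldl_min_eq]
      cases h : nmin l with
      | none => simp
      | some m => simp
    rw [foldl_add_eq_sum, foldl_add_eq_sum, h2, h2]
    simp only [zero_add]
    rw [hs]
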